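-- pv_equiv track=rewrite | github.com/jlga94/tesis | Django/get_csv.py | get_time_slices
-- ===== SOURCE A (Python) =====
-- def get_time_slices(datesLemmatizacion):
-- 	time_slice_semester = [0]
-- 	time_slice_trimester = [0]
--
-- 	count_sem = 0
-- 	count_trim = 0
-- 	for year in sorted(datesLemmatizacion.keys()):
-- 		for month in sorted(datesLemmatizacion[year].keys()):
-- 			if count_sem==6:
-- 				count_sem = 0
-- 				time_slice_semester.append(0)
-- 			if count_trim==3:
-- 				count_trim = 0
-- 				time_slice_trimester.append(0)
-- 			time_slice_semester[len(time_slice_semester)-1] += datesLemmatizacion[year][month]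
-- 			time_slice_trimester[len(time_slice_trimester)-1] += datesLemmatizacion[year][month]
--
-- 			count_sem += 1
-- 			count_trim += 1
--
-- 	return time_slice_semester,time_slice_trimester
-- ===== SOURCE B (Python) =====
-- def _chunk_sums(vs, k):
--     out = []
--     i = 0
--     while i < len(vs):
--         out.append(sum(vs[i:i + k]))
--         i += k
--     return out
--
--
-- def get_time_slices(datesLemmatizacion):
--     flat = [datesLemmatizacion[y][m]
--             for y in sorted(datesLemmatizacion)
--             for m in sorted(datesLemmatizacion[y])]
--     return (_chunk_sums(flat, 6) or [0], _chunk_sums(flat, 3) or [0])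
-- ===== Notes on version B (the rewrite author's own statement) =====
-- stated objective: simpler
-- what changed: A threads a 4-part mutable state (two bucket lists plus two wrap-around counters) through one nested loop, appending and in-place incrementing the last cell; B first flattens the sorted monthly counts into one list and then independently chunk-sums it with sizes 6 and 3, with 'or [0]' giving the empty-input default.
import Mathlib
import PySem

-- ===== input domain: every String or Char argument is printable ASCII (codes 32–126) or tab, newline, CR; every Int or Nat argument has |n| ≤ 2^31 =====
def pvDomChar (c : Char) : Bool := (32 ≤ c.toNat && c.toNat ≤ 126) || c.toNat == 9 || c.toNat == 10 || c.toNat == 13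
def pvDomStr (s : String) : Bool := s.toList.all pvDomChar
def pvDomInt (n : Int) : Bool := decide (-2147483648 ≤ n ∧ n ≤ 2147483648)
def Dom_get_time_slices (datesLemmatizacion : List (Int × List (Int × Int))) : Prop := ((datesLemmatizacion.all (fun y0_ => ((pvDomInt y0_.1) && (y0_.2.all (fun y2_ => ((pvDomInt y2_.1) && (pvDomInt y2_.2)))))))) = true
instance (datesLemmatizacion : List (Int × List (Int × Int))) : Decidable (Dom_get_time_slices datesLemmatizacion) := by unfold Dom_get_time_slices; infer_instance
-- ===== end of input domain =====

-- B replaces A's single stateful counter loop by flatten-then-chunk-sum (build the sorted flat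
-- list of counts once, then sum slices of 6 and 3); objective: simpler decomposition, same cost.


-- shared input bridge: the Python argument is a dict of dicts; build it from the association
-- list with Python's duplicate-key rule (later value wins, first position kept)
def pvDict (dl : List (Int × List (Int × Int))) : PySem.Dict Int (PySem.Dict Int Int) :=
  PySem.Dict.ofList (dl.map (fun p => (p.1, PySem.Dict.ofList p.2)))

-- ===== PORT A =====
-- the body of A's month loop: open a new semester/trimester bucket when its counter is
-- full, add the month's count v to the last cell of both lists, bump both counters
def pvStepA (st2 : List Int × List Int × Int × Int) (v : Int) : List Int × List Int × Int × Int :=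
  let p1 := if st2.2.2.1 == 6 then (st2.1 ++ [(0 : Int)], (0 : Int)) else (st2.1, st2.2.2.1)
  let p2 := if st2.2.2.2 == 3 then (st2.2.1 ++ [(0 : Int)], (0 : Int)) else (st2.2.1, st2.2.2.2)
  (PySem.List.pySetD p1.1 (PySem.List.len p1.1 - 1)
     (PySem.List.pyGetD p1.1 (PySem.List.len p1.1 - 1) 0 + v),
   PySem.List.pySetD p2.1 (PySem.List.len p2.1 - 1)
     (PySem.List.pyGetD p2.1 (PySem.List.len p2.1 - 1) 0 + v),
   p1.2 + 1, p2.2 + 1)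

def get_time_slices (datesLemmatizacion : List (Int × List (Int × Int))) : List Int × List Int :=
  let d := pvDict datesLemmatizacion
  let st := (PySem.List.sorted d.keys (fun x => x) false).foldl (fun st year =>
      let inner := (d.get? year).getD PySem.Dict.empty
      (PySem.List.sorted inner.keys (fun x => x) false).foldl
        (fun st2 month => pvStepA st2 ((inner.get? month).getD 0)) st)
    ([(0 : Int)], [(0 : Int)], (0 : Int), (0 : Int))
  (st.1, st.2.1)

-- ===== PORT B =====
-- while i < len(vs): out.append(sum(vs[i:i+k])); i += k  — the 'if k ≤ 0' guard only makes
-- the recursion total (Python's loop would not terminate there either; k is only ever 6 or 3)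
def pvChunkGo (vs : List Int) (k i : Int) : List Int :=
  if _hk : k ≤ 0 then [] else
  if _hi : i < PySem.List.len vs then
    (PySem.List.slice vs (some i) (some (i + k))).sum :: pvChunkGo vs k (i + k)
  else []
termination_by (PySem.List.len vs - i).toNat
decreasing_by
  simp only [PySem.List.len_eq] at *
  omega

def pvChunkSums (vs : List Int) (k : Int) : List Int :=
  pvChunkGo vs k 0

def get_time_slices_alt (datesLemmatizacion : List (Int × List (Int × Int))) : List Int × List Int :=
  let d := pvDict datesLemmatizacion
  let flat := (PySem.List.sorted d.keys (fun x => x) false).flatMap (fun y =>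
      let inner := (d.get? y).getD PySem.Dict.empty
      (PySem.List.sorted inner.keys (fun x => x) false).map (fun m => (inner.get? m).getD 0))
  let sem := pvChunkSums flat 6
  let tri := pvChunkSums flat 3
  (if sem = [] then [(0 : Int)] else sem, if tri = [] then [(0 : Int)] else tri)

-- ===== PRECONDITION & SPEC =====
def Spec_get_time_slices (datesLemmatizacion : List (Int × List (Int × Int))) (out : List Int × List Int) : Prop := out = get_time_slices_alt datesLemmatizacion
instance (datesLemmatizacion : List (Int × List (Int × Int))) (out : List Int × List Int) : Decidable (Spec_get_time_slices datesLemmatizacion out) := by unfold Spec_get_time_slices; infer_instance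

-- ===== CLAIM (what is proved, stated in full; the proofs are below) =====
def Claim_equal_get_time_slices : Prop := ∀ (datesLemmatizacion : List (Int × List (Int × Int))), Dom_get_time_slices datesLemmatizacion → Spec_get_time_slices datesLemmatizacion (get_time_slices datesLemmatizacion)

-- ===== LEMMAS AND PROOFS =====

-- one bucketing step of A's loop for a single chunk size k (pvStepA is two of these)
def pvStep (k : Int) (st : List Int × Int) (v : Int) : List Int × Int :=
  let p := if st.2 == k then (st.1 ++ [(0 : Int)], (0 : Int)) else st
  (PySem.List.pySetD p.1 (PySem.List.len p.1 - 1)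
     (PySem.List.pyGetD p.1 (PySem.List.len p.1 - 1) 0 + v), p.2 + 1)

theorem pv_bump (init : List Int) (a v : Int) :
    PySem.List.pySetD (init ++ [a]) (PySem.List.len (init ++ [a]) - 1)
      (PySem.List.pyGetD (init ++ [a]) (PySem.List.len (init ++ [a]) - 1) 0 + v) = init ++ [a + v] := by
  have h : PySem.List.len (init ++ [a]) - 1 = ((init.length : Nat) : Int) := by simp [pysem]
  rw [h, PySem.List.pySetD_natCast, PySem.List.pyGetD_natCast]
  simp [List.set_append_right]

-- proof-side take/drop form of B's chunking loop
def pvChunksTD (vs : List Int) (k : Int) : List Int :=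
  if _hk : k ≤ 0 then [] else
  match vs with
  | [] => []
  | v :: rest => ((v :: rest).take k.toNat).sum :: pvChunksTD ((v :: rest).drop k.toNat) k
termination_by vs.length
decreasing_by simp only [List.length_drop, List.length_cons]; omega

theorem pv_chunk_nil (k : Int) : pvChunksTD [] k = [] := by
  unfold pvChunksTD; split <;> rfl

theorem pv_chunk_cons (k : Int) (hk : 0 < k) (v : Int) (rest : List Int) :
    pvChunksTD (v :: rest) k
      = ((v :: rest).take k.toNat).sum :: pvChunksTD ((v :: rest).drop k.toNat) k := by
  conv_lhs => unfold pvChunksTD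
  simp only [dif_neg (by omega : ¬ k ≤ 0)]

-- B's index loop computes the take/drop chunking of the not-yet-visited suffix
theorem pv_go_eq (k : Int) (hk : 0 < k) (vs : List Int) :
    ∀ (n : Nat) (i : Int), 0 ≤ i → vs.length - i.toNat ≤ n →
      pvChunkGo vs k i = pvChunksTD (vs.drop i.toNat) k := by
  intro n
  induction n with
  | zero =>
      intro i hi0 hn
      rw [pvChunkGo]
      simp only [dif_neg (by omega : ¬ k ≤ 0), PySem.List.len_eq]
      rw [dif_neg (by omega : ¬ i < (vs.length : Int)),
          List.drop_eq_nil_of_le (by omega), pv_chunk_nil]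
  | succ n ih =>
      intro i hi0 hn
      rw [pvChunkGo]
      simp only [dif_neg (by omega : ¬ k ≤ 0), PySem.List.len_eq]
      by_cases hi : i < (vs.length : Int)
      · rw [dif_pos hi, ih (i + k) (by omega) (by omega)]
        cases hdrop : vs.drop i.toNat with
        | nil =>
            exfalso
            have := congrArg List.length hdrop
            simp at this
            omega
        | cons v rest =>
            rw [pv_chunk_cons k hk v rest, ← hdrop,
                PySem.List.slice_toNat vs hi0 (by omega), List.drop_drop,
                show (i + k).toNat - i.toNat = k.toNat from by omega,
                show i.toNat + k.toNat = (i + k).toNat from by omega]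
      · rw [dif_neg hi, List.drop_eq_nil_of_le (by omega), pv_chunk_nil]

theorem pv_chunk_eq (k : Int) (hk : 0 < k) (vs : List Int) :
    pvChunkSums vs k = pvChunksTD vs k := by
  unfold pvChunkSums
  rw [pv_go_eq k hk vs vs.length 0 (le_refl 0) (by omega)]
  simp

-- A's 4-tuple fold is the pair of the two independent single-size folds
theorem pv_split (vs : List Int) :
    ∀ (s t : List Int) (cs ct : Int),
      vs.foldl pvStepA (s, t, cs, ct)
      = ((vs.foldl (pvStep 6) (s, cs)).1, (vs.foldl (pvStep 3) (t, ct)).1,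
         (vs.foldl (pvStep 6) (s, cs)).2, (vs.foldl (pvStep 3) (t, ct)).2) := by
  induction vs with
  | nil => intro s t cs ct; rfl
  | cons v rest ih =>
      intro s t cs ct
      simp only [List.foldl_cons, pvStepA, pvStep]
      exact ih _ _ _ _

-- loop invariant: the open bucket holds a plus the next (k - c) values, the rest is chunked
theorem pv_loop_inv (k : Int) (hk : 0 < k) (vs : List Int) :
    ∀ (init : List Int) (a c : Int), 0 ≤ c → c ≤ k →
      (vs.foldl (pvStep k) (init ++ [a], c)).1
        = init ++ (a + (vs.take (k - c).toNat).sum) :: pvChunksTD (vs.drop (k - c).toNat) k := by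
  induction vs with
  | nil =>
      intro init a c _ _
      simp [pv_chunk_nil]
  | cons v rest ih =>
      intro init a c hc0 hck
      by_cases hck' : c = k
      · -- counter full: a fresh bucket is opened before v is added
        have hstep : pvStep k (init ++ [a], c) v = ((init ++ [a]) ++ [0 + v], 0 + 1) := by
          simp only [pvStep]
          rw [if_pos (by simp [hck']), pv_bump]
        rw [List.foldl_cons, hstep,
            ih (init ++ [a]) (0 + v) (0 + 1) (by omega) (by omega),
            show (k - c).toNat = 0 from by omega]
        simp only [List.take_zero, List.sum_nil, List.drop_zero, add_zero]
        rw [pv_chunk_cons k hk v rest,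
            show k.toNat = (k - (0 + 1)).toNat + 1 from by omega,
            List.take_succ_cons, List.drop_succ_cons, List.sum_cons]
        simp
      · -- counter not full: v is added to the open bucket
        have hstep : pvStep k (init ++ [a], c) v = (init ++ [a + v], c + 1) := by
          simp only [pvStep]
          rw [if_neg (by simpa using hck'), pv_bump]
        rw [List.foldl_cons, hstep, ih init (a + v) (c + 1) (by omega) (by omega),
            show (k - c).toNat = (k - (c + 1)).toNat + 1 from by omega,
            List.take_succ_cons, List.drop_succ_cons, List.sum_cons, add_assoc]

-- a single-size fold from the initial state ([0], 0) gives exactly B's chunk sums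
-- (with the empty-input default [0])
theorem pv_main (k : Int) (hk : 0 < k) (flat : List Int) :
    (flat.foldl (pvStep k) ([(0 : Int)], (0 : Int))).1
      = (if pvChunksTD flat k = [] then [(0 : Int)] else pvChunksTD flat k) := by
  have h := pv_loop_inv k hk flat [] 0 0 (le_refl 0) (le_of_lt hk)
  simp only [List.nil_append, Int.sub_zero, zero_add] at h
  rw [h]
  cases flat with
  | nil => simp [pv_chunk_nil]
  | cons v rest =>
      rw [pv_chunk_cons k hk v rest]
      simp

-- the nested fold over sorted keys is the fold of pvStepA over the flat value list
theorem pv_flatten (d : PySem.Dict Int (PySem.Dict Int Int))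
    (init : List Int × List Int × Int × Int) :
    ((PySem.List.sorted d.keys (fun x => x) false).foldl (fun st year =>
        (PySem.List.sorted ((d.get? year).getD PySem.Dict.empty).keys (fun x => x) false).foldl
          (fun st2 month => pvStepA st2 ((((d.get? year).getD PySem.Dict.empty).get? month).getD 0)) st) init)
      = ((PySem.List.sorted d.keys (fun x => x) false).flatMap (fun y =>
          (PySem.List.sorted ((d.get? y).getD PySem.Dict.empty).keys (fun x => x) false).map
            (fun m => (((d.get? y).getD PySem.Dict.empty).get? m).getD 0))).foldl pvStepA init := by
  rw [List.foldl_flatMap]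
  congr 1
  funext st y
  dsimp only
  rw [List.foldl_map]

-- ===== VERDICT (by name: the statement is the Claim_ definition above) =====
theorem get_time_slices_spec : Claim_equal_get_time_slices := by
  unfold Claim_equal_get_time_slices
  intro dl _
  unfold Spec_get_time_slices get_time_slices get_time_slices_alt
  dsimp only
  rw [pv_flatten (pvDict dl), pv_split]
  dsimp only
  rw [pv_chunk_eq 6 (by omega), pv_chunk_eq 3 (by omega),
      pv_main 6 (by omega), pv_main 3 (by omega)]
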